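-- pv_equiv track=rewrite | github.com/kh277/BOJ | 백준/Silver/9822. Global Warming/Global Warming.py | solve
-- ===== SOURCE A (Python) =====
-- def solve(N, data):
--     data = sorted(data, reverse=True)
--     result = 0
--     count = 0
--     visited = bytearray([0] * N)
--
--     index = 0
--     while index < N:
--         curH = data[index][0]
--
--         # 높이가 curH인 땅 전부 방문처리
--         while index < N and data[index][0] == curH:
--             nextX = data[index][1]
--             visited[nextX] = 1
--
--             # 주변 땅의 활성화 여부 파악
--             neighbor = 0
--             if nextX-1 >= 0:
--                 neighbor += visited[nextX-1]
--             if nextX+1 < N: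
--                 neighbor += visited[nextX+1]
--
--             # 섬의 개수 변화 체크
--             if neighbor == 0:
--                 count += 1
--             elif neighbor == 2:
--                 count -= 1
--
--             index += 1
--
--         result = max(result, count)
--
--     return result
-- ===== SOURCE B (Python) =====
-- def solve(N, data):
--     if N <= 0:
--         return 0
--     height = [0] * N
--     for h, x in data:
--         height[x] = h
--     best = 0
--     for t in {h for h, _ in data}:
--         runs = sum(1 for x in range(N)
--                    if height[x] >= t and (x + 1 == N or height[x + 1] < t))
--         best = max(best, runs)
--     return best
-- ===== Notes on version B (the rewrite author's own statement) =====
-- stated objective: alternative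
-- what changed: B abandons A's descending sweep with its incremental +1/0/-1 island counter and indicator bytearray: it builds a position-to-height table once and, for each distinct height t, recounts the islands from scratch by the closed form 'number of active run right-endpoints' (height[x] >= t and (x+1 == N or height[x+1] < t)), taking the max over thresholds in any order.
-- outside the precondition, e.g. on solve(2, [(3, 1), (1, 1)]): A returns 2, B returns 1; on solve(2, [(0, 0), (0, 1), (3, 1), (3, -1)]): A returns 2, B returns 1; on solve(1, [(5, 0), (3, 7)]): A returns 1, B raises IndexError
import Mathlib
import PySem

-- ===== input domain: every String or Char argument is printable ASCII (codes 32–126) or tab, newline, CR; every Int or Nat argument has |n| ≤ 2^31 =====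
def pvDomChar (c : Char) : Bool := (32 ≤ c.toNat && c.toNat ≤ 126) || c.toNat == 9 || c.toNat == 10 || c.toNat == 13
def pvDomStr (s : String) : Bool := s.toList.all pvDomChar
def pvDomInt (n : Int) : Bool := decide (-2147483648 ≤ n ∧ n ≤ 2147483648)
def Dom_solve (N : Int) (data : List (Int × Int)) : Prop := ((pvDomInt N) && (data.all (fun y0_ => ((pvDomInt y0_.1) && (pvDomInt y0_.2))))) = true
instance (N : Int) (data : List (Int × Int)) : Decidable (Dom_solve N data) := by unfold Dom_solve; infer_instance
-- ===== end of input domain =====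

-- B drops A's descending sweep with its incremental island counter and indicator array entirely:
-- it builds a position→height table once and, for each distinct height t, recounts the islands
-- from scratch by the closed form 'number of run right-endpoints at threshold t', taking the max
-- over thresholds; an alternative decomposition (stateless per-threshold recount, not a sweep).

-- ===== PORT A =====
-- inner 'while index < N and data[index][0] == curH' loop; fuel bounds the iteration count
-- (never exhausted under Pre_solve).  pyGetD/pySetD are exact here: Pre_solve keeps every index in range.
def innerA (sdata : List (Int × Int)) (N curH : Int) (index count : Int) (visited : List Int) :
    Nat → Int × Int × List Int
  | 0 => (index, count, visited)
  | fuel + 1 =>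
    if index < N ∧ (PySem.List.pyGetD sdata index (0, 0)).1 = curH then
      let nextX := (PySem.List.pyGetD sdata index (0, 0)).2
      let visited' := PySem.List.pySetD visited nextX 1
      let neighbor := (if nextX - 1 ≥ 0 then PySem.List.pyGetD visited' (nextX - 1) 0 else 0)
        + (if nextX + 1 < N then PySem.List.pyGetD visited' (nextX + 1) 0 else 0)
      let count' := if neighbor = 0 then count + 1 else if neighbor = 2 then count - 1 else count
      innerA sdata N curH (index + 1) count' visited' fuel
    else (index, count, visited)

-- outer 'while index < N' loop
def loopA (sdata : List (Int × Int)) (N : Int) (index count result : Int) (visited : List Int) :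
    Nat → Int
  | 0 => result
  | fuel + 1 =>
    if index < N then
      let curH := (PySem.List.pyGetD sdata index (0, 0)).1
      let r := innerA sdata N curH index count visited (fuel + 1)
      loopA sdata N r.1 r.2.1 (max result r.2.1) r.2.2 fuel
    else result

def solve (N : Int) (data : List (Int × Int)) : Int :=
  let sdata := PySem.List.sorted2 data (fun p => p.1) (fun p => p.2) true
  loopA sdata N 0 0 0 (List.replicate N.toNat 0) (N.toNat + 1)

-- ===== PORT B =====
-- 'height = [0]*N; for h, x in data: height[x] = h'
def heightsB (N : Int) (data : List (Int × Int)) : List Int :=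
  data.foldl (fun H p => PySem.List.pySetD H p.2 p.1) (List.replicate N.toNat 0)

-- 'sum(1 for x in range(N) if height[x] >= t and (x+1 == N or height[x+1] < t))'
def runsB (N t : Int) (height : List Int) : Int :=
  (PySem.List.pyRange 0 N 1).foldl
    (fun c x =>
      if t ≤ PySem.List.pyGetD height x 0 ∧
          (x + 1 = N ∨ PySem.List.pyGetD height (x + 1) 0 < t) then c + 1 else c) 0

def solve_alt (N : Int) (data : List (Int × Int)) : Int :=
  if N ≤ 0 then 0 else
  let height := heightsB N data
  (PySem.Set.ofList (data.map (fun p => p.1))).foldl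
    (fun best t => max best (runsB N t height)) 0

-- ===== PRECONDITION & SPEC =====
-- Pre_solve is the problem's natural domain: an empty board (N ≤ 0, both programs return 0), or
-- exactly N cells with pairwise-distinct positions 0..N-1.  Outside it A either raises IndexError
-- (len(data) < N, or a position outside [-N, N)) or returns a value accidental to its implementation
-- (entries beyond index N silently ignored, negative positions wrapping around the bytearray,
-- duplicate positions counted again), which B does not reproduce.
def Pre_solve (N : Int) (data : List (Int × Int)) : Prop :=
  N ≤ 0 ∨
    (N = (data.length : Int) ∧ (data.map (fun p => p.2)).Nodup ∧ ∀ p ∈ data, 0 ≤ p.2 ∧ p.2 < N)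
instance (N : Int) (data : List (Int × Int)) : Decidable (Pre_solve N data) := by
  unfold Pre_solve; infer_instance
def pvWitness_solve : Int × (List (Int × Int)) := (3, [(5, 0), (2, 1), (4, 2)])
def Spec_solve (N : Int) (data : List (Int × Int)) (out : Int) : Prop := out = solve_alt N data
instance (N : Int) (data : List (Int × Int)) (out : Int) : Decidable (Spec_solve N data out) := by unfold Spec_solve; infer_instance

-- ===== CLAIM (what is proved, stated in full; the proofs are below) =====
def Claim_equal_solve : Prop := ∀ (N : Int) (data : List (Int × Int)), Dom_solve N data → Pre_solve N data → Spec_solve N data (solve N data)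

-- ===== LEMMAS AND PROOFS =====

-- indicator list of the processed-position list ps (A's 'visited')
def ind (N : Int) (ps : List Int) : List Int :=
  (List.range N.toNat).map (fun (i : Nat) => if (i : Int) ∈ ps then (1 : Int) else 0)

-- number of adjacent pairs inside ps ('edges')
def ecnt (ps : List Int) : Int :=
  (ps.countP (fun a => decide ((a + 1) ∈ ps)) : Int)

-- number of islands of the set ps
def gcnt (ps : List Int) : Int := (ps.length : Int) - ecnt ps

-- A's per-position step on (count, visited)
def stepA (N : Int) (st : Int × List Int) (x : Int) : Int × List Int :=
  let v' := PySem.List.pySetD st.2 x 1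
  let nb := (if x - 1 ≥ 0 then PySem.List.pyGetD v' (x - 1) 0 else 0)
    + (if x + 1 < N then PySem.List.pyGetD v' (x + 1) 0 else 0)
  ((if nb = 0 then st.1 + 1 else if nb = 2 then st.1 - 1 else st.1), v')

-- list-level reformulation of A's nested while loops
def runsA (N : Int) : List (Int × Int) → Int × List Int → Int → Int
  | [], _, r => r
  | (h, x) :: t, st, r =>
    let run := (((h, x) :: t).takeWhile (fun p => p.1 == h)).map (fun p => p.2)
    let st' := run.foldl (stepA N) st
    runsA N (((h, x) :: t).dropWhile (fun p => p.1 == h)) st' (max r st'.1)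
  termination_by l => l.length
  decreasing_by
    simp only [List.dropWhile_cons, beq_self_eq_true, if_true]
    exact Nat.lt_succ_of_le (List.length_dropWhile_le _ _)

-- the distinct heights of the sorted list, one per equal-height group, in order
def heads : List (Int × Int) → List Int
  | [] => []
  | (h, x) :: t => h :: heads (((h, x) :: t).dropWhile (fun p => p.1 == h))
  termination_by l => l.length
  decreasing_by
    simp only [List.dropWhile_cons, beq_self_eq_true, if_true]
    exact Nat.lt_succ_of_le (List.length_dropWhile_le _ _)

theorem dropWhile_eq_drop_takeWhile {α : Type} (l : List α) (p : α → Bool) :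
    l.dropWhile p = l.drop (l.takeWhile p).length := by
  induction l with
  | nil => simp
  | cons a t ih => by_cases h : p a <;> simp [List.takeWhile_cons, h, ih]

theorem innerA_step (S : List (Int × Int)) (N h : Int) (i c : Int) (v : List Int) (fuel : Nat)
    (hcond : i < N ∧ (PySem.List.pyGetD S i (0, 0)).1 = h) :
    innerA S N h i c v (fuel + 1)
      = innerA S N h (i + 1) (stepA N (c, v) (PySem.List.pyGetD S i (0, 0)).2).1
          (stepA N (c, v) (PySem.List.pyGetD S i (0, 0)).2).2 fuel := by
  rw [innerA, if_pos hcond]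
  rfl

theorem innerA_stop (S : List (Int × Int)) (N h : Int) (i c : Int) (v : List Int) (fuel : Nat)
    (hcond : ¬ (i < N ∧ (PySem.List.pyGetD S i (0, 0)).1 = h)) :
    innerA S N h i c v (fuel + 1) = (i, c, v) := by
  rw [innerA, if_neg hcond]

theorem innerA_spec (S : List (Int × Int)) (N h : Int) (hN : N = (S.length : Int)) :
    ∀ (fuel : Nat) (j : Nat) (c : Int) (v : List Int), S.length - j ≤ fuel →
    innerA S N h (j : Int) c v fuel =
      (((j + ((S.drop j).takeWhile (fun p => p.1 == h)).length : Nat) : Int),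
        (((S.drop j).takeWhile (fun p => p.1 == h)).map (fun p => p.2)).foldl (stepA N) (c, v)) := by
  intro fuel
  induction fuel with
  | zero =>
    intro j c v hf
    have hj : S.length ≤ j := by omega
    rw [List.drop_eq_nil_of_le hj]
    simp [innerA]
  | succ fuel ih =>
    intro j c v hf
    by_cases hj : j < S.length
    · have hdrop : S.drop j = S[j] :: S.drop (j + 1) := List.drop_eq_getElem_cons hj
      have hget : PySem.List.pyGetD S ((j : Nat) : Int) (0, 0) = S[j] := by
        rw [PySem.List.pyGetD_natCast]
        exact List.getD_eq_getElem S (0, 0) hj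
      by_cases hp : S[j].1 = h
      · rw [innerA_step S N h _ c v fuel
          ⟨by rw [hN]; exact_mod_cast hj, by rw [hget]; exact hp⟩]
        have hcast : ((j : Nat) : Int) + 1 = (((j + 1 : Nat)) : Int) := by push_cast; ring
        rw [hcast, ih (j + 1) _ _ (by omega)]
        rw [hdrop, List.takeWhile_cons, if_pos (by simp [hp])]
        simp only [List.length_cons, List.map_cons, List.foldl_cons, hget, Prod.mk.injEq]
        exact ⟨by push_cast; ring, trivial⟩
      · rw [innerA_stop S N h _ c v fuel (fun hcon => hp (by rw [← hget]; exact hcon.2))]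
        rw [hdrop, List.takeWhile_cons, if_neg (by simp [hp])]
        simp
    · have hj' : S.length ≤ j := by omega
      rw [List.drop_eq_nil_of_le hj']
      rw [innerA_stop S N h _ c v fuel (by
        intro hcon
        have := hcon.1
        rw [hN] at this
        exact absurd (by exact_mod_cast this) (by omega))]
      simp

theorem loopA_step (S : List (Int × Int)) (N i c r : Int) (v : List Int) (fuel : Nat)
    (hcond : i < N) :
    loopA S N i c r v (fuel + 1)
      = loopA S N (innerA S N (PySem.List.pyGetD S i (0, 0)).1 i c v (fuel + 1)).1
          (innerA S N (PySem.List.pyGetD S i (0, 0)).1 i c v (fuel + 1)).2.1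
          (max r (innerA S N (PySem.List.pyGetD S i (0, 0)).1 i c v (fuel + 1)).2.1)
          (innerA S N (PySem.List.pyGetD S i (0, 0)).1 i c v (fuel + 1)).2.2 fuel := by
  rw [loopA, if_pos hcond]

theorem runsA_cons (N : Int) (a : Int × Int) (t : List (Int × Int)) (st : Int × List Int)
    (r : Int) :
    runsA N (a :: t) st r
      = runsA N ((a :: t).dropWhile (fun p => p.1 == a.1))
          ((((a :: t).takeWhile (fun p => p.1 == a.1)).map (fun p => p.2)).foldl (stepA N) st)
          (max r ((((a :: t).takeWhile (fun p => p.1 == a.1)).map (fun p => p.2)).foldl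
            (stepA N) st).1) := by
  obtain ⟨h, x⟩ := a
  rw [runsA]

theorem heads_cons (a : Int × Int) (t : List (Int × Int)) :
    heads (a :: t) = a.1 :: heads ((a :: t).dropWhile (fun p => p.1 == a.1)) := by
  obtain ⟨h, x⟩ := a
  rw [heads]

theorem loopA_spec (S : List (Int × Int)) (N : Int) (hN : N = (S.length : Int)) :
    ∀ (fuel : Nat) (j : Nat) (c r : Int) (v : List Int), S.length - j < fuel →
    loopA S N (j : Int) c r v fuel = runsA N (S.drop j) (c, v) r := by
  intro fuel
  induction fuel with
  | zero => intro j c r v hf; omega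
  | succ fuel ih =>
    intro j c r v hf
    by_cases hj : j < S.length
    · have hdrop : S.drop j = S[j] :: S.drop (j + 1) := List.drop_eq_getElem_cons hj
      have hget : PySem.List.pyGetD S ((j : Nat) : Int) (0, 0) = S[j] := by
        rw [PySem.List.pyGetD_natCast]
        exact List.getD_eq_getElem S (0, 0) hj
      rw [loopA_step S N _ c r v fuel (by rw [hN]; exact_mod_cast hj), hget,
        innerA_spec S N (S[j].1) hN (fuel + 1) j c v (by omega)]
      set k := ((S.drop j).takeWhile (fun p => p.1 == S[j].1)).length with hk
      have hkpos : 1 ≤ k := by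
        rw [hk, hdrop, List.takeWhile_cons, if_pos (by simp)]
        simp
      have hkle : k ≤ (S.drop j).length := by
        rw [hk]
        have := List.takeWhile_sublist (l := S.drop j) (p := fun p => p.1 == S[j].1)
        exact this.length_le
      have hdw : (S.drop j).dropWhile (fun p => p.1 == S[j].1) = S.drop (j + k) := by
        rw [dropWhile_eq_drop_takeWhile, ← hk, List.drop_drop]
      rw [ih (j + k) _ _ _ (by rw [List.length_drop] at hkle; omega)]
      rw [hdrop, runsA_cons N (S[j]) (S.drop (j + 1)) (c, v) r, ← hdrop, hdw]
    · have hj' : S.length ≤ j := by omega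
      rw [List.drop_eq_nil_of_le hj']
      rw [loopA, if_neg (by rw [hN]; intro hcon; exact absurd (by exact_mod_cast hcon) (by omega))]
      rw [runsA]

-- key lemmas about ecnt / gcnt ------------------------------------------------

theorem countP_or_eq {l : List Int} (p : Int → Bool) (y : Int) (hnd : l.Nodup) (hy : p y = false) :
    l.countP (fun a => p a || a == y) = l.countP p + (if y ∈ l then 1 else 0) := by
  induction l with
  | nil => simp
  | cons a t ih =>
    simp only [List.nodup_cons] at hnd
    rcases hnd with ⟨ha, hnd⟩
    by_cases hay : a = y
    · subst hay
      simp [hy, ih hnd, ha]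
    · have hbeq : (a == y) = false := by simp [hay]
      simp only [List.countP_cons, hbeq, Bool.or_false, ih hnd, List.mem_cons]
      by_cases hyt : y ∈ t <;> by_cases hpa : p a <;> simp [hyt, hpa, hay] <;> omega

theorem ecnt_append_singleton (ps : List Int) (x : Int) (hnd : (ps ++ [x]).Nodup) :
    ecnt (ps ++ [x]) = ecnt ps + (if x - 1 ∈ ps then 1 else 0) + (if x + 1 ∈ ps then 1 else 0) := by
  have hx : x ∉ ps := by
    intro hmem
    exact (List.disjoint_of_nodup_append hnd) hmem (by simp)
  have hndps : ps.Nodup := (List.nodup_append.mp hnd).1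
  have h1 : ps.countP (fun a => decide ((a + 1) ∈ ps ++ [x]))
      = ps.countP (fun a => decide ((a + 1) ∈ ps) || a == x - 1) := by
    apply List.countP_congr
    intro a _
    by_cases h : (a + 1) ∈ ps <;> by_cases h2 : a = x - 1 <;>
      simp [List.mem_append, h, h2] <;> omega
  have h2 : ps.countP (fun a => decide ((a + 1) ∈ ps) || a == x - 1)
      = ps.countP (fun a => decide ((a + 1) ∈ ps)) + (if x - 1 ∈ ps then 1 else 0) := by
    apply countP_or_eq _ _ hndps
    simp only [decide_eq_false_iff_not]
    have : x - 1 + 1 = x := by omega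
    rw [this]; exact hx
  have h3 : (if (x + 1) ∈ ps ++ [x] then 1 else 0) = (if x + 1 ∈ ps then (1:Nat) else 0) := by
    have : ¬ (x + 1 = x) := by omega
    simp [List.mem_append, this]
  simp only [ecnt, List.countP_append, h1, h2]
  simp only [List.countP_cons, List.countP_nil]
  by_cases ha : x - 1 ∈ ps <;> by_cases hb : (x + 1) ∈ ps <;>
    simp [ha, hb, List.mem_append, show ¬ (x + 1 = x) by omega] <;> push_cast <;> ring

theorem ecnt_perm {ps ps' : List Int} (h : ps'.Perm ps) : ecnt ps' = ecnt ps := by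
  unfold ecnt
  congr 1
  rw [List.countP_congr (p := fun a => decide ((a + 1) ∈ ps')) (q := fun a => decide ((a + 1) ∈ ps))
    (fun a _ => by simp [h.mem_iff])]
  exact h.countP_eq _

theorem gcnt_perm {ps ps' : List Int} (h : ps'.Perm ps) : gcnt ps' = gcnt ps := by
  simp [gcnt, h.length_eq, ecnt_perm h]

-- indicator lemmas ------------------------------------------------------------

theorem ind_get (N : Int) (ps : List Int) (y : Int) (h0 : 0 ≤ y) (hy : y < N) :
    PySem.List.pyGetD (ind N ps) y 0 = if y ∈ ps then 1 else 0 := by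
  have hlen : (ind N ps).length = N.toNat := by simp [ind]
  rw [PySem.List.pyGetD_eq_getElem _ _ h0 (by rw [hlen]; exact_mod_cast (by omega : y < (N.toNat : Int)))]
  unfold ind
  rw [List.getElem_map, List.getElem_range, Int.toNat_of_nonneg h0]

theorem ind_set (N : Int) (ps : List Int) (x : Int) (h0 : 0 ≤ x) (hx : x < N) :
    PySem.List.pySetD (ind N ps) x 1 = ind N (ps ++ [x]) := by
  rw [PySem.List.pySetD_of_nonneg _ _ h0]
  apply List.ext_getElem
  · simp [ind]
  · intro i h1 h2
    have h2' : i < N.toNat := by simpa [ind] using h2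
    rw [List.getElem_set]
    unfold ind
    simp only [List.getElem_map, List.getElem_range]
    by_cases hix : i = x.toNat
    · subst hix
      rw [Int.toNat_of_nonneg h0, if_pos rfl, if_pos (by simp)]
    · rw [if_neg (fun h => hix h.symm)]
      have hne : (i : Int) ≠ x := by omega
      by_cases hmem : (i : Int) ∈ ps
      · rw [if_pos hmem, if_pos (by simp [hmem])]
      · rw [if_neg hmem, if_neg (by simp [hmem, hne])]

-- A's step keeps the invariant (count, visited) = (gcnt ps, ind N ps) ---------

theorem stepA_inv (N : Int) (ps : List Int) (x : Int)
    (hx : 0 ≤ x ∧ x < N) (hps : ∀ y ∈ ps, 0 ≤ y ∧ y < N) (hnd : (ps ++ [x]).Nodup) :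
    stepA N (gcnt ps, ind N ps) x = (gcnt (ps ++ [x]), ind N (ps ++ [x])) := by
  have hset : PySem.List.pySetD (ind N ps) x 1 = ind N (ps ++ [x]) := ind_set N ps x hx.1 hx.2
  have hg1 : (if x - 1 ≥ 0 then PySem.List.pyGetD (ind N (ps ++ [x])) (x - 1) 0 else 0)
      = (if x - 1 ∈ ps then 1 else 0) := by
    by_cases h : x - 1 ≥ 0
    · rw [if_pos h, ind_get N _ _ h (by omega)]
      by_cases hmem : x - 1 ∈ ps
      · rw [if_pos (by simp [hmem]), if_pos hmem]
      · rw [if_neg (by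
            intro hcon
            rcases List.mem_append.mp hcon with hmm | hmm
            · exact hmem hmm
            · simp at hmm), if_neg hmem]
    · rw [if_neg h]
      have : x - 1 ∉ ps := fun hm => absurd ((hps _ hm).1) (by omega)
      simp [this]
  have hg2 : (if x + 1 < N then PySem.List.pyGetD (ind N (ps ++ [x])) (x + 1) 0 else 0)
      = (if x + 1 ∈ ps then 1 else 0) := by
    by_cases h : x + 1 < N
    · rw [if_pos h, ind_get N _ _ (by omega) h]
      by_cases hmem : x + 1 ∈ ps
      · rw [if_pos (by simp [hmem]), if_pos hmem]
      · rw [if_neg (by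
            intro hcon
            rcases List.mem_append.mp hcon with hmm | hmm
            · exact hmem hmm
            · simp at hmm), if_neg hmem]
    · rw [if_neg h]
      have : x + 1 ∉ ps := fun hm => absurd ((hps _ hm).2) (by omega)
      simp [this]
  have hgc : gcnt (ps ++ [x])
      = gcnt ps + 1 - (if x - 1 ∈ ps then 1 else 0) - (if x + 1 ∈ ps then 1 else 0) := by
    unfold gcnt
    rw [ecnt_append_singleton ps x hnd]
    simp only [List.length_append, List.length_cons, List.length_nil]
    push_cast
    ring
  unfold stepA
  simp only [hset, hg1, hg2]
  rw [hgc]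
  by_cases h1 : x - 1 ∈ ps <;> by_cases h2 : x + 1 ∈ ps <;> simp [h1, h2] <;> norm_num

theorem foldA_inv (N : Int) (g ps : List Int)
    (hg : ∀ y ∈ g, 0 ≤ y ∧ y < N) (hps : ∀ y ∈ ps, 0 ≤ y ∧ y < N)
    (hnd : (ps ++ g).Nodup) :
    g.foldl (stepA N) (gcnt ps, ind N ps) = (gcnt (ps ++ g), ind N (ps ++ g)) := by
  induction g generalizing ps with
  | nil => simp
  | cons y t ih =>
    have hassoc : (ps ++ [y]) ++ t = ps ++ y :: t := by simp
    have hnd1 : (ps ++ [y]).Nodup := by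
      refine List.Nodup.sublist ?_ hnd
      exact List.Sublist.append_left (by simp) ps
    have harg1 : ∀ z ∈ t, 0 ≤ z ∧ z < N := fun z hz => hg z (by simp [hz])
    have harg2 : ∀ z ∈ ps ++ [y], 0 ≤ z ∧ z < N := by
      intro z hz
      rcases List.mem_append.mp hz with h | h
      · exact hps z h
      · have : z = y := by simpa using h
        subst this
        exact hg z (by simp)
    rw [List.foldl_cons, stepA_inv N ps y (hg y (by simp)) hps hnd1,
      ih (ps ++ [y]) harg1 harg2 (by rw [hassoc]; exact hnd), hassoc]

-- sortedness helpers ----------------------------------------------------------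

theorem pairwise_dropWhile_lt (l : List (Int × Int)) (h0 : Int)
    (hpw : l.Pairwise (fun a b => b.1 ≤ a.1)) (hall : ∀ x ∈ l, x.1 ≤ h0) :
    ∀ x ∈ l.dropWhile (fun p => p.1 == h0), x.1 < h0 := by
  induction l with
  | nil => simp
  | cons a t ih =>
    by_cases ha : (a.1 == h0) = true
    · simp only [List.dropWhile_cons, ha, if_true]
      exact ih (hpw.sublist (List.sublist_cons_self a t)) (fun x hx => hall x (by simp [hx]))
    · have ha' : (a.1 == h0) = false := by simpa using ha
      simp only [List.dropWhile_cons, ha', Bool.false_eq_true, if_false]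
      intro x hx
      rcases List.mem_cons.mp hx with rfl | hxt
      · have h1 : x.1 ≠ h0 := by simpa using ha
        have h2 := hall x (by simp)
        omega
      · have h1 : x.1 ≤ a.1 := (List.pairwise_cons.mp hpw).1 x hxt
        have h2 : a.1 ≠ h0 := by simpa using ha
        have h3 : a.1 ≤ h0 := hall a (by simp)
        omega

-- heads: membership and sortedness --------------------------------------------

theorem heads_subset : ∀ (n : Nat) (S : List (Int × Int)), S.length = n →
    ∀ h ∈ heads S, h ∈ S.map (fun p => p.1) := by
  intro n
  induction n using Nat.strong_induction_on with
  | _ n IH =>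
    intro S hlen h hh
    cases S with
    | nil => simp [heads] at hh
    | cons a t =>
      rw [heads_cons] at hh
      rcases List.mem_cons.mp hh with rfl | hh'
      · simp
      · have hS'sub : ((a :: t).dropWhile (fun p => p.1 == a.1)).Sublist (a :: t) :=
          List.dropWhile_sublist _
        have hlt : ((a :: t).dropWhile (fun p => p.1 == a.1)).length < n := by
          have h1 : ((a :: t).dropWhile (fun p => p.1 == a.1)).length ≤ t.length := by
            simp only [List.dropWhile_cons, beq_self_eq_true, if_true]
            exact List.length_dropWhile_le _ _
          simp only [List.length_cons] at hlen
          omega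
        have := IH _ hlt _ rfl h hh'
        exact (hS'sub.map (fun p => p.1)).mem this

theorem heads_mem : ∀ (n : Nat) (S : List (Int × Int)), S.length = n →
    ∀ h, h ∈ S.map (fun p => p.1) → h ∈ heads S := by
  intro n
  induction n using Nat.strong_induction_on with
  | _ n IH =>
    intro S hlen h hh
    cases S with
    | nil => simp at hh
    | cons a t =>
      rw [heads_cons]
      by_cases hha : h = a.1
      · simp [hha]
      · rcases List.mem_map.mp hh with ⟨p, hp, rfl⟩
        have hsplit : ((a :: t).takeWhile (fun p => p.1 == a.1))
            ++ ((a :: t).dropWhile (fun p => p.1 == a.1)) = a :: t :=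
          List.takeWhile_append_dropWhile
        have hpmem : p ∈ ((a :: t).dropWhile (fun p => p.1 == a.1)) := by
          have : p ∈ ((a :: t).takeWhile (fun p => p.1 == a.1))
              ++ ((a :: t).dropWhile (fun p => p.1 == a.1)) := by rw [hsplit]; exact hp
          rcases List.mem_append.mp this with hc | hc
          · exact absurd (by simpa using List.mem_takeWhile_imp hc) hha
          · exact hc
        have hlt : ((a :: t).dropWhile (fun p => p.1 == a.1)).length < n := by
          have h1 : ((a :: t).dropWhile (fun p => p.1 == a.1)).length ≤ t.length := by
            simp only [List.dropWhile_cons, beq_self_eq_true, if_true]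
            exact List.length_dropWhile_le _ _
          simp only [List.length_cons] at hlen
          omega
        exact List.mem_cons_of_mem _
          (IH _ hlt _ rfl p.1 (List.mem_map.mpr ⟨p, hpmem, rfl⟩))

theorem heads_pairwise : ∀ (n : Nat) (S : List (Int × Int)), S.length = n →
    S.Pairwise (fun a b => b.1 ≤ a.1) → (heads S).Pairwise (fun a b => b < a) := by
  intro n
  induction n using Nat.strong_induction_on with
  | _ n IH =>
    intro S hlen hpw
    cases S with
    | nil => simp [heads]
    | cons a t =>
      rw [heads_cons]
      set S' := ((a :: t).dropWhile (fun p => p.1 == a.1)) with hS'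
      have hS'lt : ∀ x ∈ S', x.1 < a.1 := by
        rw [hS']
        apply pairwise_dropWhile_lt (a :: t) a.1 hpw
        intro x hx
        rcases List.mem_cons.mp hx with rfl | hxt
        · exact le_refl _
        · exact (List.pairwise_cons.mp hpw).1 x hxt
      have hlt : S'.length < n := by
        have h1 : S'.length ≤ t.length := by
          rw [hS']
          simp only [List.dropWhile_cons, beq_self_eq_true, if_true]
          exact List.length_dropWhile_le _ _
        simp only [List.length_cons] at hlen
        omega
      refine List.Pairwise.cons ?_ (IH _ hlt _ rfl (hpw.sublist (List.dropWhile_sublist _)))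
      intro h hh
      rcases List.mem_map.mp (heads_subset S'.length S' rfl h hh) with ⟨p, hp, rfl⟩
      exact hS'lt p hp

-- A's loop as a fold of boundary island counts over the distinct heights ------

theorem headsMaster (N : Int) : ∀ (n : Nat) (S : List (Int × Int)), S.length = n →
    ∀ (ps : List Int) (r : Int),
    S.Pairwise (fun a b => b.1 ≤ a.1) →
    (∀ p ∈ S, 0 ≤ p.2 ∧ p.2 < N) → (∀ y ∈ ps, 0 ≤ y ∧ y < N) →
    (ps ++ S.map (fun p => p.2)).Nodup →
    runsA N S (gcnt ps, ind N ps) r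
      = (heads S).foldl
          (fun r h => max r (gcnt (ps ++ (S.filter (fun p => h ≤ p.1)).map (fun p => p.2)))) r := by
  intro n
  induction n using Nat.strong_induction_on with
  | _ n IH =>
    intro S hlen ps r hpair hrange hpsr hnd
    cases S with
    | nil =>
      rw [runsA]
      simp [heads]
    | cons a t =>
      set run := ((a :: t).takeWhile (fun p => p.1 == a.1)) with hrundef
      set S' := ((a :: t).dropWhile (fun p => p.1 == a.1)) with hS'def
      have hsplit : run ++ S' = a :: t := List.takeWhile_append_dropWhile
      have hrun_all : ∀ p ∈ run, p.1 = a.1 := by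
        intro p hp
        have := List.mem_takeWhile_imp hp
        simpa using this
      have hrun_cons : ∃ u, run = a :: u := by
        rw [hrundef, List.takeWhile_cons, if_pos (by simp)]
        exact ⟨_, rfl⟩
      have hS'sub : S'.Sublist (a :: t) := List.dropWhile_sublist _
      have htail_le : ∀ p ∈ t, p.1 ≤ a.1 := (List.pairwise_cons.mp hpair).1
      have hS'_lt : ∀ p ∈ S', p.1 < a.1 := by
        rw [hS'def]
        apply pairwise_dropWhile_lt (a :: t) a.1 hpair
        intro x hx
        rcases List.mem_cons.mp hx with rfl | hxt
        · exact le_refl _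
        · exact htail_le x hxt
      have hfilter_top : (a :: t).filter (fun p => a.1 ≤ p.1) = run := by
        rw [← hsplit, List.filter_append]
        rw [List.filter_eq_self.mpr (by intro p hp; have := hrun_all p hp; simp; omega)]
        rw [List.filter_eq_nil_iff.mpr (by intro p hp; have := hS'_lt p hp; simp; omega)]
        simp
      have hfilter_lower : ∀ h : Int, h < a.1 →
          (a :: t).filter (fun p => h ≤ p.1) = run ++ S'.filter (fun p => h ≤ p.1) := by
        intro h hhlt
        rw [← hsplit, List.filter_append]
        rw [List.filter_eq_self.mpr (by intro p hp; have := hrun_all p hp; simp; omega)]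
      set g := run.map (fun p => p.2) with hgdef
      have hmap2 : (a :: t).map (fun p => p.2) = g ++ S'.map (fun p => p.2) := by
        rw [← hsplit, List.map_append]
      have hndpsg : (ps ++ g).Nodup := by
        refine List.Nodup.sublist ?_ hnd
        rw [hmap2, ← List.append_assoc]
        exact List.sublist_append_left _ _
      have hgrange : ∀ y ∈ g, 0 ≤ y ∧ y < N := by
        intro y hy
        rcases List.mem_map.mp hy with ⟨p, hp, rfl⟩
        exact hrange p ((List.takeWhile_sublist _).mem hp)
      -- A side: one runsA step
      rw [runsA_cons N a t (gcnt ps, ind N ps) r]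
      rw [← hrundef, ← hS'def, ← hgdef]
      rw [foldA_inv N g ps hgrange hpsr hndpsg]
      -- heads side: one cons step
      rw [heads_cons, ← hS'def, List.foldl_cons]
      obtain ⟨u, hu⟩ := hrun_cons
      have hlenS' : S'.length < n := by
        have h1 : run.length + S'.length = t.length + 1 := by
          have := congrArg List.length hsplit
          simpa using this
        have h2 : 1 ≤ run.length := by rw [hu]; simp
        simp only [List.length_cons] at hlen
        omega
      have hIH := IH S'.length hlenS' S' rfl (ps ++ g) (max r (gcnt (ps ++ g)))
        (hpair.sublist hS'sub)
        (fun p hp => hrange p (hS'sub.mem hp))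
        (by
          intro y hy
          rcases List.mem_append.mp hy with h | h
          · exact hpsr y h
          · exact hgrange y h)
        (by rw [List.append_assoc, ← hmap2]; exact hnd)
      rw [hIH]
      have hfirst : max r (gcnt (ps ++ ((a :: t).filter (fun p => a.1 ≤ p.1)).map (fun p => p.2)))
          = max r (gcnt (ps ++ g)) := by
        rw [hfilter_top, ← hgdef]
      rw [hfirst]
      apply PySem.List.foldl_congr_mem
      intro acc h hh
      have hhlt : h < a.1 := by
        rcases List.mem_map.mp (heads_subset S'.length S' rfl h hh) with ⟨p, hp, rfl⟩
        exact hS'_lt p hp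
      rw [hfilter_lower h hhlt, List.map_append, ← List.append_assoc, ← hgdef]

-- folding max over a permutation ----------------------------------------------

theorem foldl_max_perm (c : Int → Int) {l1 l2 : List Int} (h : l1.Perm l2) :
    ∀ r : Int, l1.foldl (fun r h => max r (c h)) r = l2.foldl (fun r h => max r (c h)) r := by
  induction h with
  | nil => intro r; rfl
  | cons x h ih => intro r; simp only [List.foldl_cons, ih]
  | swap x y l =>
    intro r
    simp only [List.foldl_cons]
    rw [max_right_comm]
  | trans h1 h2 ih1 ih2 => intro r; rw [ih1, ih2]

-- counting helpers -------------------------------------------------------------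

theorem foldl_count_if_prop (p : Int → Prop) [DecidablePred p] (l : List Int) :
    ∀ a : Int, l.foldl (fun acc x => if p x then acc + 1 else acc) a
      = a + (l.countP (fun x => decide (p x)) : Int) := by
  induction l with
  | nil => intro a; simp
  | cons x t ih =>
    intro a
    rw [List.foldl_cons, List.countP_cons]
    by_cases h : p x <;> simp [h, ih] <;> push_cast <;> ring

theorem countP_split {α : Type} (l : List α) (p q : α → Bool) :
    l.countP (fun x => p x && !q x) + l.countP (fun x => p x && q x) = l.countP p := by
  induction l with
  | nil => simp
  | cons a t ih =>
    simp only [List.countP_cons]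
    by_cases hp : p a <;> by_cases hq : q a <;> simp [hp, hq] <;> omega

theorem filter_mem_perm {ps R : List Int} (hps : ps.Nodup) (hR : R.Nodup) (hsub : ∀ x ∈ ps, x ∈ R) :
    (R.filter (fun x => decide (x ∈ ps))).Perm ps := by
  rw [List.perm_ext_iff_of_nodup (hR.filter _) hps]
  intro x
  simp only [List.mem_filter, decide_eq_true_eq]
  constructor
  · exact fun h => h.2
  · intro h
    exact ⟨hsub x h, h⟩

theorem countP_range_mem {ps R : List Int} (q : Int → Bool)
    (hps : ps.Nodup) (hR : R.Nodup) (hsub : ∀ x ∈ ps, x ∈ R) :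
    R.countP (fun x => decide (x ∈ ps) && q x) = ps.countP q := by
  have h1 : R.countP (fun x => decide (x ∈ ps) && q x)
      = (R.filter (fun x => decide (x ∈ ps))).countP q := by
    rw [List.countP_filter]
    apply List.countP_congr
    intro a _
    by_cases h : a ∈ ps <;> by_cases h2 : q a <;> simp [h, h2]
  rw [h1, (filter_mem_perm hps hR hsub).countP_eq]

-- the height table -------------------------------------------------------------

theorem hlookup_notmem (l : List (Int × Int)) :
    ∀ (acc : List Int) (x : Int), 0 ≤ x → x < (acc.length : Int) →
    (∀ p ∈ l, 0 ≤ p.2) → x ∉ l.map (fun p => p.2) →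
    PySem.List.pyGetD (l.foldl (fun H p => PySem.List.pySetD H p.2 p.1) acc) x 0
      = PySem.List.pyGetD acc x 0 := by
  induction l with
  | nil => intro acc x _ _ _ _; rfl
  | cons q t ih =>
    intro acc x hx0 hxlen hr hnm
    have hq2 : 0 ≤ q.2 := hr q (by simp)
    have hset : PySem.List.pySetD acc q.2 q.1 = acc.set q.2.toNat q.1 :=
      PySem.List.pySetD_of_nonneg _ _ hq2
    have hlen' : ((acc.set q.2.toNat q.1).length : Int) = (acc.length : Int) := by simp
    rw [List.foldl_cons, hset,
      ih (acc.set q.2.toNat q.1) x hx0 (by rw [hlen']; exact hxlen)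
        (fun p hp => hr p (by simp [hp])) (fun hc => hnm (by simp at hc ⊢; right; exact hc))]
    have hxne : x ≠ q.2 := by
      intro hc
      exact hnm (by simp [← hc])
    rw [PySem.List.pyGetD_eq_getElem _ _ hx0 (by rw [hlen']; exact hxlen),
      PySem.List.pyGetD_eq_getElem _ _ hx0 hxlen]
    exact List.getElem_set_ne (by omega) _

theorem hlookup (l : List (Int × Int)) :
    ∀ (acc : List Int) (x : Int), 0 ≤ x → x < (acc.length : Int) →
    ((l.map (fun p => p.2)).Nodup) → (∀ p ∈ l, 0 ≤ p.2 ∧ p.2 < (acc.length : Int)) →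
    PySem.List.pyGetD (l.foldl (fun H p => PySem.List.pySetD H p.2 p.1) acc) x 0
      = (((l.find? (fun p => p.2 == x)).map (fun p => p.1)).getD
          (PySem.List.pyGetD acc x 0)) := by
  induction l with
  | nil => intro acc x _ _ _ _; rfl
  | cons q t ih =>
    intro acc x hx0 hxlen hnd hr
    have hq2 : 0 ≤ q.2 := (hr q (by simp)).1
    have hq2len : q.2 < (acc.length : Int) := (hr q (by simp)).2
    have hset : PySem.List.pySetD acc q.2 q.1 = acc.set q.2.toNat q.1 :=
      PySem.List.pySetD_of_nonneg _ _ hq2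
    have hlen' : ((acc.set q.2.toNat q.1).length : Int) = (acc.length : Int) := by simp
    simp only [List.map_cons, List.nodup_cons] at hnd
    rw [List.foldl_cons, hset]
    by_cases hqx : q.2 = x
    · subst hqx
      rw [List.find?_cons_of_pos (by simp)]
      rw [hlookup_notmem t (acc.set q.2.toNat q.1) q.2 hx0 (by rw [hlen']; exact hxlen)
        (fun p hp => (hr p (by simp [hp])).1) hnd.1]
      rw [PySem.List.pyGetD_eq_getElem _ _ hx0 (by rw [hlen']; exact hxlen)]
      rw [List.getElem_set_self]
      rfl
    · rw [List.find?_cons_of_neg (by simp [hqx])]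
      rw [ih (acc.set q.2.toNat q.1) x hx0 (by rw [hlen']; exact hxlen) hnd.2
        (fun p hp => by
          have := hr p (by simp [hp])
          exact ⟨this.1, by rw [hlen']; exact this.2⟩)]
      have hgd : PySem.List.pyGetD (acc.set q.2.toNat q.1) x 0 = PySem.List.pyGetD acc x 0 := by
        rw [PySem.List.pyGetD_eq_getElem _ _ hx0 (by rw [hlen']; exact hxlen),
          PySem.List.pyGetD_eq_getElem _ _ hx0 hxlen]
        exact List.getElem_set_ne (by omega) _
      rw [hgd]

-- pigeonhole: N distinct positions in [0, N) cover every x in [0, N) ----------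

theorem covered (L : List Int) (N : Int) (hnd : L.Nodup) (hlen : (L.length : Int) = N)
    (hr : ∀ y ∈ L, 0 ≤ y ∧ y < N) : ∀ x, 0 ≤ x → x < N → x ∈ L := by
  intro x hx0 hxN
  have hsub : L ⊆ PySem.List.pyRange 0 N 1 := by
    intro y hy
    rw [PySem.List.mem_pyRange_one]
    exact ⟨(hr y hy).1, (hr y hy).2⟩
  have hperm : L.Perm (PySem.List.pyRange 0 N 1) :=
    (hnd.subperm hsub).perm_of_length_le (by rw [PySem.List.length_pyRange_one]; omega)
  rw [hperm.mem_iff, PySem.List.mem_pyRange_one]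
  exact ⟨hx0, hxN⟩

-- B's per-threshold count equals the island count of the active positions -----

theorem runsB_eq_gcnt (N : Int) (data : List (Int × Int)) (t : Int)
    (hNlen : N = (data.length : Int))
    (hnd : (data.map (fun p => p.2)).Nodup)
    (hr : ∀ p ∈ data, 0 ≤ p.2 ∧ p.2 < N) :
    runsB N t (heightsB N data) = gcnt ((data.filter (fun p => t ≤ p.1)).map (fun p => p.2)) := by
  set ps := (data.filter (fun p => t ≤ p.1)).map (fun p => p.2) with hps
  have hlenH : ((heightsB N data).length : Int) = N := by
    unfold heightsB
    have : ∀ (l : List (Int × Int)) (acc : List Int),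
        (l.foldl (fun H p => PySem.List.pySetD H p.2 p.1) acc).length = acc.length := by
      intro l
      induction l with
      | nil => intro acc; rfl
      | cons q u ih => intro acc; rw [List.foldl_cons, ih, PySem.List.length_pySetD]
    rw [this]
    simp
    omega
  have hpsnd : ps.Nodup := by
    rw [hps]
    exact List.Nodup.sublist (List.Sublist.map _ List.filter_sublist) hnd
  have hpsr : ∀ y ∈ ps, 0 ≤ y ∧ y < N := by
    intro y hy
    rw [hps] at hy
    rcases List.mem_map.mp hy with ⟨p, hp, rfl⟩
    exact hr p (List.mem_of_mem_filter hp)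
  -- membership in ps ↔ the height table value is ≥ t
  have hkey : ∀ x : Int, 0 ≤ x → x < N →
      (t ≤ PySem.List.pyGetD (heightsB N data) x 0 ↔ x ∈ ps) := by
    intro x hx0 hxN
    have hcov : x ∈ data.map (fun p => p.2) :=
      covered _ N hnd (by rw [List.length_map]; omega) (by
        intro y hy
        rcases List.mem_map.mp hy with ⟨p, hp, rfl⟩
        exact hr p hp) x hx0 hxN
    have hfind : ∃ p₀, data.find? (fun p => p.2 == x) = some p₀ := by
      cases hf : data.find? (fun p => p.2 == x) with
      | some p₀ => exact ⟨p₀, rfl⟩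
      | none =>
        rcases List.mem_map.mp hcov with ⟨p, hp, hpx⟩
        exact absurd (List.find?_eq_none.mp hf p hp) (by simp [hpx])
    rcases hfind with ⟨p₀, hp₀⟩
    have hp₀mem : p₀ ∈ data := List.mem_of_find?_eq_some hp₀
    have hp₀x : p₀.2 = x := by
      have := List.find?_some hp₀
      simpa using this
    have hH : PySem.List.pyGetD (heightsB N data) x 0 = p₀.1 := by
      unfold heightsB
      rw [hlookup data _ x hx0 (by simp; omega) hnd (by
        intro p hp
        have := hr p hp
        simp
        omega), hp₀]
      rfl
    rw [hH, hps]
    constructor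
    · intro hle
      exact List.mem_map.mpr ⟨p₀, List.mem_filter.mpr ⟨hp₀mem, by simp [hle]⟩, hp₀x⟩
    · intro hmem
      rcases List.mem_map.mp hmem with ⟨p, hpf, hpx⟩
      have hpd := List.mem_of_mem_filter hpf
      have hpt : t ≤ p.1 := by
        have := List.of_mem_filter hpf
        simpa using this
      have : p = p₀ := List.inj_on_of_nodup_map hnd hpd hp₀mem (by rw [hpx, hp₀x])
      rw [← this]
      exact hpt
  -- runsB as a countP over the range
  unfold runsB
  rw [foldl_count_if_prop]
  have hcong : (PySem.List.pyRange 0 N 1).countP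
      (fun x => decide (t ≤ PySem.List.pyGetD (heightsB N data) x 0 ∧
        (x + 1 = N ∨ PySem.List.pyGetD (heightsB N data) (x + 1) 0 < t)))
      = (PySem.List.pyRange 0 N 1).countP
        (fun x => decide (x ∈ ps) && !(decide ((x + 1) ∈ ps))) := by
    apply List.countP_congr
    intro x hx
    rw [PySem.List.mem_pyRange_one] at hx
    have h1 : (t ≤ PySem.List.pyGetD (heightsB N data) x 0) ↔ x ∈ ps := hkey x hx.1 hx.2
    have heq : (t ≤ PySem.List.pyGetD (heightsB N data) x 0 ∧
        (x + 1 = N ∨ PySem.List.pyGetD (heightsB N data) (x + 1) 0 < t))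
        ↔ (x ∈ ps ∧ ¬ ((x + 1) ∈ ps)) := by
      by_cases hxe : x + 1 = N
      · have hnm : (x + 1) ∉ ps := fun hc => by have := (hpsr _ hc).2; omega
        constructor
        · intro hp; exact ⟨h1.mp hp.1, hnm⟩
        · intro hp; exact ⟨h1.mpr hp.1, Or.inl hxe⟩
      · have hx1N : x + 1 < N := by omega
        have h2 : (t ≤ PySem.List.pyGetD (heightsB N data) (x + 1) 0) ↔ (x + 1) ∈ ps :=
          hkey (x + 1) (by omega) hx1N
        constructor
        · intro hp
          refine ⟨h1.mp hp.1, ?_⟩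
          rcases hp.2 with hc | hc
          · exact absurd hc hxe
          · intro hm; have := h2.mpr hm; omega
        · intro hp
          refine ⟨h1.mpr hp.1, Or.inr ?_⟩
          have : ¬ (t ≤ PySem.List.pyGetD (heightsB N data) (x + 1) 0) := fun hc => hp.2 (h2.mp hc)
          omega
    rw [decide_eq_decide.mpr heq]
    · simp
    · infer_instance
  rw [hcong]
  have hsub : ∀ x ∈ ps, x ∈ PySem.List.pyRange 0 N 1 := by
    intro x hx
    rw [PySem.List.mem_pyRange_one]
    exact ⟨(hpsr x hx).1, (hpsr x hx).2⟩
  have hsplit := countP_split (PySem.List.pyRange 0 N 1)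
    (fun x => decide (x ∈ ps)) (fun x => decide ((x + 1) ∈ ps))
  have hmemc : (PySem.List.pyRange 0 N 1).countP (fun x => decide (x ∈ ps)) = ps.length := by
    have := countP_range_mem (fun _ => true) hpsnd (PySem.List.nodup_pyRange_one 0 N) hsub
    simpa using this
  have hpairc : (PySem.List.pyRange 0 N 1).countP
      (fun x => decide (x ∈ ps) && decide ((x + 1) ∈ ps))
      = ps.countP (fun a => decide ((a + 1) ∈ ps)) :=
    countP_range_mem _ hpsnd (PySem.List.nodup_pyRange_one 0 N) hsub
  rw [hmemc, hpairc] at hsplit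
  unfold gcnt ecnt
  omega

-- sorted2 is height-descending ------------------------------------------------

theorem insertBy_pairwise {α : Type} (p : α → α → Prop) (before : α → α → Bool)
    (htrans : ∀ a b c, p a b → p b c → p a c)
    (h1 : ∀ a b, before a b = true → p a b) (h2 : ∀ a b, before a b = false → p b a)
    (x : α) (ys : List α) (hys : ys.Pairwise p) :
    (PySem.List.insertBy before x ys).Pairwise p := by
  induction ys with
  | nil => simp [PySem.List.insertBy]
  | cons y t ih =>
    rw [List.pairwise_cons] at hys
    by_cases hb : before x y
    · simp only [PySem.List.insertBy, hb, if_true]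
      refine List.Pairwise.cons ?_ (List.Pairwise.cons hys.1 hys.2)
      intro z hz
      rcases List.mem_cons.mp hz with rfl | hzt
      · exact h1 _ _ hb
      · exact htrans _ _ _ (h1 _ _ hb) (hys.1 z hzt)
    · have hb' : before x y = false := by simpa using hb
      simp only [PySem.List.insertBy, hb', Bool.false_eq_true, if_false]
      refine List.Pairwise.cons ?_ (ih hys.2)
      intro z hz
      rcases (PySem.List.mem_insertBy before x z t).mp hz with rfl | hzt
      · exact h2 _ _ hb'
      · exact hys.1 z hzt

theorem foldl_insertBy_pairwise {α : Type} (p : α → α → Prop) (before : α → α → Bool)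
    (htrans : ∀ a b c, p a b → p b c → p a c)
    (h1 : ∀ a b, before a b = true → p a b) (h2 : ∀ a b, before a b = false → p b a) :
    ∀ (xs acc : List α), acc.Pairwise p →
      (xs.foldl (fun acc x => PySem.List.insertBy before x acc) acc).Pairwise p := by
  intro xs
  induction xs with
  | nil => intro acc h; simpa using h
  | cons a t ih =>
    intro acc h
    rw [List.foldl_cons]
    exact ih _ (insertBy_pairwise p before htrans h1 h2 a acc h)

theorem sorted2_pairwise_fst (data : List (Int × Int)) :
    (PySem.List.sorted2 data (fun p => p.1) (fun p => p.2) true).Pairwise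
      (fun a b => b.1 ≤ a.1) := by
  unfold PySem.List.sorted2
  apply foldl_insertBy_pairwise (fun (a b : Int × Int) => b.1 ≤ a.1)
  · intro a b c hab hbc; omega
  · intro a b h
    by_cases hba : b.1 < a.1
    · omega
    · by_cases hab : a.1 < b.1
      · exfalso; simp [hba, hab] at h
      · omega
  · intro a b h
    by_cases hba : b.1 < a.1
    · exfalso; simp [hba] at h
    · omega
  · exact List.Pairwise.nil

-- ===== VERDICT (by name: the statement is the Claim_ definition above) =====
theorem solve_spec : Claim_equal_solve := by
  unfold Claim_equal_solve
  intro N data _hdom hpre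
  unfold Spec_solve
  by_cases hN : N ≤ 0
  · have hA0 : solve N data = 0 := by
      show loopA (PySem.List.sorted2 data (fun p => p.1) (fun p => p.2) true) N 0
        0 0 (List.replicate N.toNat 0) (N.toNat + 1) = 0
      have hfuel : N.toNat + 1 = 0 + 1 := by omega
      rw [hfuel, loopA, if_neg (by omega)]
    rw [hA0]
    unfold solve_alt
    rw [if_pos hN]
  rcases hpre with hle | ⟨hNlen, hnd2, hrange⟩
  · exact absurd hle hN
  set S := PySem.List.sorted2 data (fun p => p.1) (fun p => p.2) true with hS
  have hSperm : S.Perm data := PySem.List.sorted2_perm data _ _ true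
  have hSlen : S.length = data.length := hSperm.length_eq
  have hN0 : 0 ≤ N := by rw [hNlen]; positivity
  have hNS : N = (S.length : Int) := by rw [hSlen]; exact hNlen
  have hreplicate : List.replicate N.toNat (0 : Int) = ind N [] := by
    unfold ind
    simp
  have hSrange : ∀ p ∈ S, 0 ≤ p.2 ∧ p.2 < N := fun p hp => hrange p (hSperm.mem_iff.mp hp)
  have hSnd : (S.map (fun p => p.2)).Nodup := (hSperm.map _).nodup_iff.mpr hnd2
  have hA : solve N data = runsA N S (gcnt [], ind N []) 0 := by
    show loopA S N ((0 : Nat) : Int) 0 0 (List.replicate N.toNat 0) (N.toNat + 1) = _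
    rw [hreplicate, loopA_spec S N hNS (N.toNat + 1) 0 0 0 (ind N []) (by omega)]
    rw [List.drop_zero]
    norm_num [gcnt, ecnt]
  rw [hA, headsMaster N S.length S rfl [] 0 (sorted2_pairwise_fst data)
    hSrange (by intro y hy; simp at hy) (by simpa using hSnd)]
  -- rewrite each boundary count to B's per-threshold count
  have hstep : ∀ (r h : Int),
      max r (gcnt ([] ++ (S.filter (fun p => h ≤ p.1)).map (fun p => p.2)))
        = max r (runsB N h (heightsB N data)) := by
    intro r h
    rw [List.nil_append, runsB_eq_gcnt N data h hNlen hnd2 hrange]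
    have : ((S.filter (fun p => h ≤ p.1)).map (fun p => p.2)).Perm
        ((data.filter (fun p => h ≤ p.1)).map (fun p => p.2)) :=
      (hSperm.filter _).map _
    rw [gcnt_perm this.symm]
  rw [PySem.List.foldl_congr_mem (heads S)
    (fun r h => max r (gcnt ([] ++ (S.filter (fun p => h ≤ p.1)).map (fun p => p.2))))
    (fun r h => max r (runsB N h (heightsB N data))) 0
    (fun acc x _ => hstep acc x)]
  -- heads S is a permutation of set(heights of data)
  have hheadsnd : (heads S).Nodup :=
    ((heads_pairwise S.length S rfl (sorted2_pairwise_fst data)).imp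
      (fun h => by omega)).nodup
  have hperm : (heads S).Perm (PySem.Set.ofList (data.map (fun p => p.1))) := by
    rw [List.perm_ext_iff_of_nodup hheadsnd (PySem.Set.nodup_ofList _)]
    intro h
    rw [PySem.Set.mem_ofList, ← (hSperm.map (fun p => p.1)).mem_iff]
    constructor
    · exact fun hh => heads_subset S.length S rfl h hh
    · exact fun hh => heads_mem S.length S rfl h hh
  rw [foldl_max_perm (fun h => runsB N h (heightsB N data)) hperm 0]
  unfold solve_alt
  rw [if_neg hN]
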